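-- pv_equiv track=rewrite | github.com/StanfordAHA/garnet | mini_mapper/__init__.py | port_rename
-- ===== SOURCE A (Python) =====
-- def port_rename(netlist):
--     # this is for the garnet weird names
--     for net_id in netlist:
--         net = netlist[net_id]
--         for i in range(len(net)):
--             blk_id, port = net[i]
--             if blk_id[0] == "I":
--                 if port == "in":
--                     port = "f2io_16"
--                 else:
--                     port = "io2f_16"
--             elif blk_id[0] == "i":
--                 if port == "inb":
--                     port = "f2io_1"
--                 else:
--                     port = "io2f_1"
--             elif blk_id[0] == "p":
--                 if port == "out":
--                     port = "alu_res"
--                 elif port == "outb":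
--                     port = "res_p"
--             elif blk_id[0] == "m":
--                 if port == "rdata":
--                     #port = "data_out_0"
--                     port = "data_out"
--                 elif port == "wdata":
--                     #port = "data_in_0"
--                     port = "data_in"
--                 elif port == "ren":
--                     #port = "ren_in_0"
--                     port = "ren_in"
--                 elif port == "wen":
--                     #port = "wen_in_0"
--                     port = "wen_in"
--                 elif port == "addr":
--                     port = "addr_in_0"
--                 elif port == "valid":
--                     port = "valid_out_0"
--
--             net[i] = blk_id, port
--     return netlist
-- ===== SOURCE B (Python) =====
-- _P_MAP = {"out": "alu_res", "outb": "res_p"}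
-- _M_MAP = {"rdata": "data_out", "wdata": "data_in", "ren": "ren_in",
--           "wen": "wen_in", "addr": "addr_in_0", "valid": "valid_out_0"}
--
--
-- def port_rename(netlist):
--     # staged passes: each pass rewrites one block type across the whole net,
--     # splicing the rebuilt net back in place (same mutation as the original)
--     for net_id in netlist:
--         net = netlist[net_id]
--         net[:] = [(b, "f2io_16" if p == "in" else "io2f_16") if b[0] == "I" else (b, p)
--                   for b, p in net]
--         net[:] = [(b, "f2io_1" if p == "inb" else "io2f_1") if b[0] == "i" else (b, p)
--                   for b, p in net]
--         net[:] = [(b, _P_MAP.get(p, p)) if b[0] == "p" else (b, p) for b, p in net]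
--         net[:] = [(b, _M_MAP.get(p, p)) if b[0] == "m" else (b, p) for b, p in net]
--     return netlist
-- ===== Notes on version B (the rewrite author's own statement) =====
-- stated objective: alternative
-- what changed: Replaces A's single pass with a per-element if/elif branch chain by four staged whole-net rewrite passes (one per block type: I, i, p, m), each a comprehension spliced back in place; the p/m passes use a lookup map instead of branches.
import Mathlib
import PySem

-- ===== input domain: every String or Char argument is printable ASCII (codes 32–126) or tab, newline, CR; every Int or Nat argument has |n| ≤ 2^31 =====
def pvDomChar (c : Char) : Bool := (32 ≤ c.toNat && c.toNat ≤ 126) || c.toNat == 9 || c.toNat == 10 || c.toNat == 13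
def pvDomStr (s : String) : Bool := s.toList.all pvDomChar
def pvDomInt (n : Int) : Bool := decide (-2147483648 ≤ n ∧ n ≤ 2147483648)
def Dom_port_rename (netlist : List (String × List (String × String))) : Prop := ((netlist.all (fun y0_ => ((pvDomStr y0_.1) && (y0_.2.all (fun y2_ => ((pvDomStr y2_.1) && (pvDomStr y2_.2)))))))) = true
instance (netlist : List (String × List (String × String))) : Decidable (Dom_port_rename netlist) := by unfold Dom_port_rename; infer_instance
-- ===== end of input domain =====

-- B replaces A's single pass with a per-element if/elif chain by four staged whole-net
-- rewrite passes (one per block type); equal RETURN value (both Pythons mutate in place).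

-- ===== PORT A =====
-- A's per-pair branch chain: blk_id[0] is PySem.Str.pyGet? blk_id 0 (none = IndexError,
-- excluded by Pre_; the none branch keeps port, unreachable under Pre_).
def pvRenameA (blk_id port : String) : String :=
  if PySem.Str.pyGet? blk_id 0 = some 'I' then
    if port = "in" then "f2io_16" else "io2f_16"
  else if PySem.Str.pyGet? blk_id 0 = some 'i' then
    if port = "inb" then "f2io_1" else "io2f_1"
  else if PySem.Str.pyGet? blk_id 0 = some 'p' then
    if port = "out" then "alu_res" else if port = "outb" then "res_p" else port
  else if PySem.Str.pyGet? blk_id 0 = some 'm' then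
    if port = "rdata" then "data_out"
    else if port = "wdata" then "data_in"
    else if port = "ren" then "ren_in"
    else if port = "wen" then "wen_in"
    else if port = "addr" then "addr_in_0"
    else if port = "valid" then "valid_out_0"
    else port
  else port

def port_rename (netlist : List (String × List (String × String))) : List (String × List (String × String)) :=
  netlist.map (fun nn => (nn.1, nn.2.map (fun bp => (bp.1, pvRenameA bp.1 bp.2))))

-- ===== PORT B =====
-- one staged pass: rewrite the port of every pair whose blk_id starts with ch
def pvStep (ch : Char) (f : String → String) (bp : String × String) : String × String :=
  if PySem.Str.pyGet? bp.1 0 = some ch then (bp.1, f bp.2) else (bp.1, bp.2)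

def pvPass (ch : Char) (f : String → String) (net : List (String × String)) : List (String × String) :=
  net.map (pvStep ch f)

def pvPMap : PySem.Dict String String := PySem.Dict.ofList [("out", "alu_res"), ("outb", "res_p")]
def pvMMap : PySem.Dict String String :=
  PySem.Dict.ofList [("rdata", "data_out"), ("wdata", "data_in"), ("ren", "ren_in"),
                     ("wen", "wen_in"), ("addr", "addr_in_0"), ("valid", "valid_out_0")]

def port_rename_alt (netlist : List (String × List (String × String))) : List (String × List (String × String)) :=
  netlist.map (fun nn => (nn.1,
    pvPass 'm' (fun p => PySem.Dict.getD pvMMap p p)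
      (pvPass 'p' (fun p => PySem.Dict.getD pvPMap p p)
        (pvPass 'i' (fun p => if p = "inb" then "f2io_1" else "io2f_1")
          (pvPass 'I' (fun p => if p = "in" then "f2io_16" else "io2f_16") nn.2)))))

-- ===== PRECONDITION & SPEC =====
-- Pre_ excludes netlists where some net entry has a zero-length blk_id: there indexing
-- its first character raises IndexError in both A and B.
def Pre_port_rename (netlist : List (String × List (String × String))) : Prop :=
  ∀ nn ∈ netlist, ∀ bp ∈ nn.2, bp.1 ≠ ""
instance (netlist : List (String × List (String × String))) : Decidable (Pre_port_rename netlist) := by unfold Pre_port_rename; infer_instance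

def pvWitness_port_rename : (List (String × List (String × String))) :=
  [("e0", [("I1", "in"), ("p3", "out")]), ("e1", [("m5", "rdata"), ("x7", "foo")])]

def Spec_port_rename (netlist : List (String × List (String × String))) (out : List (String × List (String × String))) : Prop := out = port_rename_alt netlist
instance (netlist : List (String × List (String × String))) (out : List (String × List (String × String))) : Decidable (Spec_port_rename netlist out) := by unfold Spec_port_rename; infer_instance

-- ===== CLAIM (what is proved, stated in full; the proofs are below) =====
def Claim_equal_port_rename : Prop := ∀ (netlist : List (String × List (String × String))), Dom_port_rename netlist → Pre_port_rename netlist → Spec_port_rename netlist (port_rename netlist)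

-- ===== LEMMAS AND PROOFS =====
lemma pvChain_eq (b p : String) :
    pvStep 'm' (fun p => PySem.Dict.getD pvMMap p p)
      (pvStep 'p' (fun p => PySem.Dict.getD pvPMap p p)
        (pvStep 'i' (fun p => if p = "inb" then "f2io_1" else "io2f_1")
          (pvStep 'I' (fun p => if p = "in" then "f2io_16" else "io2f_16") (b, p))))
    = (b, pvRenameA b p) := by
  cases h : PySem.List.pyGet? b.toList 0 with
  | none => simp [pvStep, pvRenameA, h]
  | some c =>
    by_cases hI : c = 'I'
    · subst hI; simp [pvStep, pvRenameA, h]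
    · by_cases hi : c = 'i'
      · subst hi; simp [pvStep, pvRenameA, h]
      · by_cases hP : c = 'p'
        · subst hP
          by_cases h1 : p = "out"
          · subst h1; simp [pvStep, pvRenameA, h]; decide
          · by_cases h2 : p = "outb"
            · subst h2; simp [pvStep, pvRenameA, h]; decide
            · simp [pvStep, pvRenameA, h, h1, h2, pvPMap, PySem.Dict.ofList, PySem.Dict.getD, PySem.Dict.get?, PySem.Dict.insert, PySem.Dict.update, PySem.Dict.empty, Ne.symm h1, Ne.symm h2]
        · by_cases hm : c = 'm'
          · subst hm
            by_cases h1 : p = "rdata"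
            · subst h1; simp [pvStep, pvRenameA, h]; decide
            · by_cases h2 : p = "wdata"
              · subst h2; simp [pvStep, pvRenameA, h]; decide
              · by_cases h3 : p = "ren"
                · subst h3; simp [pvStep, pvRenameA, h]; decide
                · by_cases h4 : p = "wen"
                  · subst h4; simp [pvStep, pvRenameA, h]; decide
                  · by_cases h5 : p = "addr"
                    · subst h5; simp [pvStep, pvRenameA, h]; decide
                    · by_cases h6 : p = "valid"
                      · subst h6; simp [pvStep, pvRenameA, h]; decide
                      · simp [pvStep, pvRenameA, h, h1, h2, h3, h4, h5, h6, pvMMap, PySem.Dict.ofList, PySem.Dict.getD, PySem.Dict.get?, PySem.Dict.insert, PySem.Dict.update, PySem.Dict.empty, Ne.symm h1, Ne.symm h2, Ne.symm h3, Ne.symm h4, Ne.symm h5, Ne.symm h6]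
          · simp [pvStep, pvRenameA, h, hI, hi, hP, hm]

lemma pvPasses_eq (net : List (String × String)) :
    pvPass 'm' (fun p => PySem.Dict.getD pvMMap p p)
      (pvPass 'p' (fun p => PySem.Dict.getD pvPMap p p)
        (pvPass 'i' (fun p => if p = "inb" then "f2io_1" else "io2f_1")
          (pvPass 'I' (fun p => if p = "in" then "f2io_16" else "io2f_16") net)))
    = net.map (fun bp => (bp.1, pvRenameA bp.1 bp.2)) := by
  simp only [pvPass, List.map_map]
  apply List.map_congr_left
  intro bp _
  obtain ⟨b1, p1⟩ := bp
  simp only [Function.comp_apply]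
  exact pvChain_eq b1 p1

-- ===== VERDICT (by name: the statement is the Claim_ definition above) =====
theorem port_rename_spec : Claim_equal_port_rename := by
  intro netlist _ _
  unfold Spec_port_rename port_rename port_rename_alt
  simp [pvPasses_eq]
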